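-- pv_equiv track=rewrite | github.com/GayathriMatha/Master-project | Basic_Theory/Basic_Theory-Implementation.py | rpoeq
-- ===== SOURCE A (Python) =====
-- def find_common_suffix(s1, s2):
--
--     suffix = ''
--     for i in range(1, min(len(s1), len(s2))+1):
--         if s1[-i] == s2[-i]:
--             suffix = s1[-i] + suffix
--         else:
--             break
--     return suffix
--
-- def remove_common_suffix(s1, s2):
--
--     suffix = find_common_suffix(s1, s2)
--     if (suffix == ''):
--         return (s1, s2)
--     else:
--         return (s1[:-len(suffix)], s2[:-len(suffix)])
--
-- def is_subseq(x, y):  # Stephan Pochmann on the internet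
--     it = iter(y)
--     return all(c in it for c in x)
--
-- def tail(ls):
--     if (len(ls) == 0):
--         return None
--     else:
--         return ls[1:]
--
-- def higher_prec(sym1, sym2, prec_list):
--     sym = hd(prec_list)
--     if (sym1 == sym):
--         return True
--     elif (sym2 == sym):
--         return False
--     else:
--         return higher_prec(sym1, sym2, tail(prec_list))
--
-- def hd(L):
--     if type(L) == type([]):
--         if len(L) == 0: return None
--         else: return L[0]
--     else: return None
--
-- def rpoeq(str1, str2, preclist):
--     (str1, str2) = remove_common_suffix(str1, str2)
--     if (str1 == str2):
--         return True
--     else: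
--         if is_subseq(str1, str2):
--             return False
--         else:
--             if is_subseq(str2, str1):
--                 return True
--             else:
--                 xa = str1[0]
--                 xb = str2[0]
--                 if (xa == xb):
--                     return rpoeq(str1[1:], str2[1:], preclist)
--                 else:
--                     if higher_prec(xa, xb, preclist):
--                         return rpoeq(str1, str2[1:], preclist)
--                     else:
--                         return rpoeq(str1[1:], str2, preclist)
-- ===== SOURCE B (Python) =====
-- def _suffix_len(s1, s2):
--     k = 0
--     for a, b in zip(reversed(s1), reversed(s2)):
--         if a != b:
--             break
--         k += 1
--     return k
--
-- def _subseq(x, y):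
--     rem = x
--     for c in y:
--         if rem and rem[0] == c:
--             rem = rem[1:]
--     return rem == ''
--
-- def rpoeq(str1, str2, preclist):
--     n = len(preclist)
--     rank = {}
--     for i, s in enumerate(preclist):
--         if s not in rank:
--             rank[s] = i
--     while True:
--         k = _suffix_len(str1, str2)
--         str1, str2 = str1[:len(str1) - k], str2[:len(str2) - k]
--         if str1 == str2:
--             return True
--         if _subseq(str1, str2):
--             return False
--         if _subseq(str2, str1):
--             return True
--         xa, xb = str1[0], str2[0]
--         if xa == xb:
--             str1, str2 = str1[1:], str2[1:]
--         elif rank.get(xa, n) < rank.get(xb, n):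
--             str2 = str2[1:]
--         else:
--             str1 = str1[1:]
-- ===== Notes on version B (the rewrite author's own statement) =====
-- stated objective: alternative
-- what changed: rpoeq's tail recursion becomes an iterative while-loop, the per-comparison linear scan of preclist (higher_prec) is replaced by a first-occurrence rank dictionary built once and compared with get, the common suffix is removed via a two-pointer length count instead of quadratic string prepending, and the subsequence test consumes a remainder pointer instead of Python's iterator-membership trick.
-- outside the precondition, e.g. on rpoeq('aq', 'bqa', ['a']): A returns True, B returns True; on rpoeq('dc', 'cda', ['c', 'b']): A returns False, B returns False
import Mathlib
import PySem

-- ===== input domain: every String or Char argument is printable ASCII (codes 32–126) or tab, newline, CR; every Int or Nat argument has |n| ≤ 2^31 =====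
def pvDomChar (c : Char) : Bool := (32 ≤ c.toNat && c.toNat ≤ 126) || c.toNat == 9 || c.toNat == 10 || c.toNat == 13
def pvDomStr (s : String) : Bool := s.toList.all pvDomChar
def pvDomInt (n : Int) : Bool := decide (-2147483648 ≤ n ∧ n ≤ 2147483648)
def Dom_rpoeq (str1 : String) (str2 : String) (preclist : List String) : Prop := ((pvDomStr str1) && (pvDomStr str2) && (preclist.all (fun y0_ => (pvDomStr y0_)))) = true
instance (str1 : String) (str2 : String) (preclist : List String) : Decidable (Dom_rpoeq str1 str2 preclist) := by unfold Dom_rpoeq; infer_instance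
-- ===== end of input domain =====

-- B replaces A's tail recursion by an iterative loop, replaces the repeated linear scans of
-- preclist (higher_prec) by a rank dictionary built once, computes the common-suffix length with a
-- two-pointer scan instead of building the suffix string, and tests subsequences by consuming a
-- pointer over y instead of Python's iterator trick (objective: alternative decomposition).

-- ===== PORT A =====
-- find_common_suffix's loop 'for i in range(1, min+1): if s1[-i] == s2[-i]: suffix = s1[-i] + suffix else: break'
-- walks both strings from the end; ported as a recursion over the two reversed lists building the
-- matched part (pvFcsGo collects the suffix reversed; .reverse restores Python's prepend order).
def pvFcsGo : List Char → List Char → List Char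
  | a :: as, b :: bs => if a = b then a :: pvFcsGo as bs else []
  | _, _ => []

def pvFindCommonSuffix (s1 s2 : List Char) : List Char :=
  (pvFcsGo s1.reverse s2.reverse).reverse

-- remove_common_suffix: s[:-len(suffix)] with len(suffix) > 0 is List.take (length - len).
def pvRemoveCommonSuffix (s1 s2 : List Char) : List Char × List Char :=
  if pvFindCommonSuffix s1 s2 = [] then (s1, s2)
  else (s1.take (s1.length - (pvFindCommonSuffix s1 s2).length),
        s2.take (s2.length - (pvFindCommonSuffix s1 s2).length))

-- is_subseq's 'it = iter(y); all(c in it for c in x)': each 'c in it' consumes y up to and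
-- including the first occurrence of c (pvSkipUntil; none = c not found, so all(...) is False).
def pvSkipUntil (c : Char) : List Char → Option (List Char)
  | [] => none
  | y :: ys => if y = c then some ys else pvSkipUntil c ys

def pvIsSubseq : List Char → List Char → Bool
  | [], _ => true
  | c :: cs, ys =>
    match pvSkipUntil c ys with
    | some rest => pvIsSubseq cs rest
    | none => false

-- higher_prec with hd/tail inlined: hd [] = None (matches neither string), and the subsequent
-- recursive call on tail([]) = None raises TypeError in Python — modelled by none.
def pvHigherPrec (sym1 sym2 : String) : List String → Option Bool
  | [] => none
  | x :: rest =>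
    if sym1 = x then some true
    else if sym2 = x then some false
    else pvHigherPrec sym1 sym2 rest

-- three facts the termination arguments below cite
lemma pvRCS_fst_length (s1 s2 : List Char) : (pvRemoveCommonSuffix s1 s2).1.length ≤ s1.length := by
  rw [pvRemoveCommonSuffix]; split <;> simp [List.length_take]

lemma pvRCS_snd_length (s1 s2 : List Char) : (pvRemoveCommonSuffix s1 s2).2.length ≤ s2.length := by
  rw [pvRemoveCommonSuffix]; split <;> simp [List.length_take]

lemma pv_isSubseq_nil (t : List Char) : pvIsSubseq [] t = true := by simp [pvIsSubseq]

-- rpoeq itself; a TypeError from higher_prec propagates as none.  str1[0] / str2[0] are headI /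
-- tail: exact for nonempty strings, and the guards make the empty case unreachable (an empty side
-- is a subsequence of the other, so Python returns before indexing).
def pvRpoeqAux (s1 s2 : List Char) (pl : List String) : Option Bool :=
  if _h1 : (pvRemoveCommonSuffix s1 s2).1 = (pvRemoveCommonSuffix s1 s2).2 then some true
  else if h2 : pvIsSubseq (pvRemoveCommonSuffix s1 s2).1 (pvRemoveCommonSuffix s1 s2).2 then some false
  else if h3 : pvIsSubseq (pvRemoveCommonSuffix s1 s2).2 (pvRemoveCommonSuffix s1 s2).1 then some true
  else
    if (pvRemoveCommonSuffix s1 s2).1.headI = (pvRemoveCommonSuffix s1 s2).2.headI then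
      pvRpoeqAux (pvRemoveCommonSuffix s1 s2).1.tail (pvRemoveCommonSuffix s1 s2).2.tail pl
    else
      match pvHigherPrec (String.singleton (pvRemoveCommonSuffix s1 s2).1.headI)
          (String.singleton (pvRemoveCommonSuffix s1 s2).2.headI) pl with
      | some true => pvRpoeqAux (pvRemoveCommonSuffix s1 s2).1 (pvRemoveCommonSuffix s1 s2).2.tail pl
      | some false => pvRpoeqAux (pvRemoveCommonSuffix s1 s2).1.tail (pvRemoveCommonSuffix s1 s2).2 pl
      | none => none
termination_by s1.length + s2.length
decreasing_by
  all_goals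
    have e1 := pvRCS_fst_length s1 s2
    have e2 := pvRCS_snd_length s1 s2
    have n1 : (pvRemoveCommonSuffix s1 s2).1 ≠ [] := by
      intro hh; apply h2; rw [hh]; exact pv_isSubseq_nil _
    have n2 : (pvRemoveCommonSuffix s1 s2).2 ≠ [] := by
      intro hh; apply h3; rw [hh]; exact pv_isSubseq_nil _
    have l1 := List.length_pos_of_ne_nil n1
    have l2 := List.length_pos_of_ne_nil n2
    simp only [List.length_tail]
    omega

def rpoeq (str1 : String) (str2 : String) (preclist : List String) : Bool :=
  (pvRpoeqAux str1.toList str2.toList preclist).getD false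

-- ===== PORT B =====
-- B's _suffix_len: 'for a, b in zip(reversed(s1), reversed(s2)): if a != b: break; k += 1'.
def pvSuffLenGo : List (Char × Char) → Nat
  | [] => 0
  | (a, b) :: rest => if a ≠ b then 0 else pvSuffLenGo rest + 1

-- B's trimming line 'str1, str2 = str1[:len(str1)-k], str2[:len(str2)-k]'.
def pvTrimB (s1 s2 : List Char) : List Char × List Char :=
  (s1.take (s1.length - pvSuffLenGo (s1.reverse.zip s2.reverse)),
   s2.take (s2.length - pvSuffLenGo (s1.reverse.zip s2.reverse)))

-- B's _subseq loop body: 'if rem and rem[0] == c: rem = rem[1:]'.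
def pvSubStep (rem : List Char) (c : Char) : List Char :=
  match rem with
  | r :: rs => if r = c then rs else r :: rs
  | [] => []

def pvSubseqB (x y : List Char) : Bool := (y.foldl pvSubStep x).isEmpty

-- B's rank-building loop: 'for i, s in enumerate(preclist): if s not in rank: rank[s] = i'.
def pvBuildRank : List String → Nat → PySem.Dict String Nat → PySem.Dict String Nat
  | [], _, d => d
  | s :: rest, i, d => pvBuildRank rest (i + 1) (if d.contains s then d else d.insert s i)

lemma pvTrimB_fst_length (s1 s2 : List Char) : (pvTrimB s1 s2).1.length ≤ s1.length := by
  simp [pvTrimB, List.length_take]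

lemma pvTrimB_snd_length (s1 s2 : List Char) : (pvTrimB s1 s2).2.length ≤ s2.length := by
  simp [pvTrimB, List.length_take]

lemma pv_subseqB_nil (t : List Char) : pvSubseqB [] t = true := by
  induction t with
  | nil => rfl
  | cons b bs ih => simpa [pvSubseqB, pvSubStep] using ih

-- B's 'while True:' loop; the state is the current (str1, str2) pair.
def pvAltLoop (rank : PySem.Dict String Nat) (n : Nat) (s1 s2 : List Char) : Bool :=
  if _h1 : (pvTrimB s1 s2).1 = (pvTrimB s1 s2).2 then true
  else if h2 : pvSubseqB (pvTrimB s1 s2).1 (pvTrimB s1 s2).2 then false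
  else if h3 : pvSubseqB (pvTrimB s1 s2).2 (pvTrimB s1 s2).1 then true
  else
    if (pvTrimB s1 s2).1.headI = (pvTrimB s1 s2).2.headI then
      pvAltLoop rank n (pvTrimB s1 s2).1.tail (pvTrimB s1 s2).2.tail
    else if rank.getD (String.singleton (pvTrimB s1 s2).1.headI) n
        < rank.getD (String.singleton (pvTrimB s1 s2).2.headI) n then
      pvAltLoop rank n (pvTrimB s1 s2).1 (pvTrimB s1 s2).2.tail
    else
      pvAltLoop rank n (pvTrimB s1 s2).1.tail (pvTrimB s1 s2).2
termination_by s1.length + s2.length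
decreasing_by
  all_goals
    have e1 := pvTrimB_fst_length s1 s2
    have e2 := pvTrimB_snd_length s1 s2
    have n1 : (pvTrimB s1 s2).1 ≠ [] := by
      intro hh; apply h2; rw [hh]; exact pv_subseqB_nil _
    have n2 : (pvTrimB s1 s2).2 ≠ [] := by
      intro hh; apply h3; rw [hh]; exact pv_subseqB_nil _
    have l1 := List.length_pos_of_ne_nil n1
    have l2 := List.length_pos_of_ne_nil n2
    simp only [List.length_tail]
    omega

def rpoeq_alt (str1 : String) (str2 : String) (preclist : List String) : Bool :=
  pvAltLoop (pvBuildRank preclist 0 PySem.Dict.empty) preclist.length str1.toList str2.toList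

-- ===== PRECONDITION & SPEC =====
-- A raises TypeError when higher_prec runs off the end of preclist, i.e. when the two compared
-- first characters are both absent from preclist.  That set is recursive in A's own loop, so Pre_
-- is a closed-form sufficient condition: either every differing pair of characters of the two
-- strings is ordered by preclist (so no lookup can fail), or one string is a subsequence of the
-- other (so A answers before ever consulting preclist).  Pre_ therefore also excludes some inputs
-- on which A does return (runs that happen to terminate before reaching an uncovered pair); B
-- agrees with A on those as well — see the cites in claim.json.
def Pre_rpoeq (str1 : String) (str2 : String) (preclist : List String) : Prop :=
  (str1.toList.all (fun c1 => str2.toList.all (fun c2 =>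
      c1 == c2 || preclist.contains (String.singleton c1)
        || preclist.contains (String.singleton c2))) = true)
  ∨ str1.toList.Sublist str2.toList ∨ str2.toList.Sublist str1.toList

instance (str1 : String) (str2 : String) (preclist : List String) : Decidable (Pre_rpoeq str1 str2 preclist) := by
  unfold Pre_rpoeq; infer_instance

def pvWitness_rpoeq : String × String × List String := ("ab", "ba", ["a", "b"])

def Spec_rpoeq (str1 : String) (str2 : String) (preclist : List String) (out : Bool) : Prop := out = rpoeq_alt str1 str2 preclist
instance (str1 : String) (str2 : String) (preclist : List String) (out : Bool) : Decidable (Spec_rpoeq str1 str2 preclist out) := by unfold Spec_rpoeq; infer_instance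

-- ===== CLAIM (what is proved, stated in full; the proofs are below) =====
def Claim_equal_rpoeq : Prop := ∀ (str1 : String) (str2 : String) (preclist : List String), Dom_rpoeq str1 str2 preclist → Pre_rpoeq str1 str2 preclist → Spec_rpoeq str1 str2 preclist (rpoeq str1 str2 preclist)

-- ===== LEMMAS AND PROOFS =====

lemma pv_singleton_ne {a b : Char} (h : a ≠ b) : String.singleton a ≠ String.singleton b := by
  intro he
  exact h (by simpa using congrArg String.toList he)

-- A's suffix and B's suffix length agree.
lemma pvFcsGo_length : ∀ r1 r2 : List Char, (pvFcsGo r1 r2).length = pvSuffLenGo (r1.zip r2) := by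
  intro r1
  induction r1 with
  | nil => intro r2; simp [pvFcsGo, pvSuffLenGo]
  | cons a as ih =>
    intro r2
    cases r2 with
    | nil => simp [pvFcsGo, pvSuffLenGo]
    | cons b bs =>
      by_cases hab : a = b <;> simp [pvFcsGo, pvSuffLenGo, hab, ih]

lemma pv_trim_eq (s1 s2 : List Char) : pvRemoveCommonSuffix s1 s2 = pvTrimB s1 s2 := by
  rw [pvRemoveCommonSuffix, pvTrimB]
  split
  · rename_i h
    have h0 : pvSuffLenGo (s1.reverse.zip s2.reverse) = 0 := by
      rw [← pvFcsGo_length]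
      have he : pvFcsGo s1.reverse s2.reverse = [] := by
        have := congrArg List.reverse h
        simpa [pvFindCommonSuffix] using this
      simp [he]
    simp [h0]
  · simp [pvFindCommonSuffix, pvFcsGo_length]

-- the two trimmed parts share the dropped common suffix
lemma pv_take_spec : ∀ r1 r2 : List Char,
    r1.take (pvSuffLenGo (r1.zip r2)) = r2.take (pvSuffLenGo (r1.zip r2)) := by
  intro r1
  induction r1 with
  | nil => intro r2; simp [pvSuffLenGo]
  | cons a as ih =>
    intro r2
    cases r2 with
    | nil => simp [pvSuffLenGo]
    | cons b bs =>
      by_cases hab : a = b <;> simp [pvSuffLenGo, hab, ih]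

lemma pv_trim_decompose (s1 s2 : List Char) :
    ∃ u, s1 = (pvTrimB s1 s2).1 ++ u ∧ s2 = (pvTrimB s1 s2).2 ++ u := by
  refine ⟨s1.drop (s1.length - pvSuffLenGo (s1.reverse.zip s2.reverse)), ?_, ?_⟩
  · simp [pvTrimB]
  · have hdrop : s1.drop (s1.length - pvSuffLenGo (s1.reverse.zip s2.reverse))
        = s2.drop (s2.length - pvSuffLenGo (s1.reverse.zip s2.reverse)) := by
      have h1 : (s1.reverse.take (pvSuffLenGo (s1.reverse.zip s2.reverse))).reverse
          = s1.drop (s1.length - pvSuffLenGo (s1.reverse.zip s2.reverse)) := by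
        rw [List.take_reverse, List.reverse_reverse]
      have h2 : (s2.reverse.take (pvSuffLenGo (s1.reverse.zip s2.reverse))).reverse
          = s2.drop (s2.length - pvSuffLenGo (s1.reverse.zip s2.reverse)) := by
        rw [List.take_reverse, List.reverse_reverse]
      rw [← h1, ← h2, pv_take_spec s1.reverse s2.reverse]
    rw [hdrop]
    simp [pvTrimB]

lemma pv_trim_sublist {s1 s2 : List Char} (h : s1.Sublist s2) :
    ((pvTrimB s1 s2).1).Sublist (pvTrimB s1 s2).2 := by
  obtain ⟨u, h1, h2⟩ := pv_trim_decompose s1 s2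
  apply (List.append_sublist_append_right u).mp
  rw [← h1, ← h2]
  exact h

lemma pv_trim_sublist' {s1 s2 : List Char} (h : s2.Sublist s1) :
    ((pvTrimB s1 s2).2).Sublist (pvTrimB s1 s2).1 := by
  obtain ⟨u, h1, h2⟩ := pv_trim_decompose s1 s2
  apply (List.append_sublist_append_right u).mp
  rw [← h1, ← h2]
  exact h

-- B's pointer-consuming subsequence test equals A's iterator-based one.
lemma pv_subseqB_eq : ∀ y x : List Char, pvSubseqB x y = pvIsSubseq x y := by
  intro y
  induction y with
  | nil =>
    intro x
    cases x <;> simp [pvSubseqB, pvIsSubseq, pvSkipUntil]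
  | cons b bs ih =>
    intro x
    cases x with
    | nil =>
      rw [pv_subseqB_nil, pv_isSubseq_nil]
    | cons c cs =>
      by_cases hcb : c = b
      · subst hcb
        have hih := ih cs
        simp only [pvSubseqB] at hih
        simp [pvSubseqB, pvSubStep, pvIsSubseq, pvSkipUntil, hih]
      · have hih := ih (c :: cs)
        simp only [pvSubseqB, List.foldl_cons, pvSubStep, if_neg hcb] at hih ⊢
        rw [hih]
        show pvIsSubseq (c :: cs) bs = pvIsSubseq (c :: cs) (b :: bs)
        simp only [pvIsSubseq, pvSkipUntil]
        rw [if_neg (show ¬ b = c from fun h => hcb h.symm)]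

-- greedy matching is complete: an actual sublist passes A's is_subseq.
lemma pv_sublist_isSubseq : ∀ y x : List Char, x.Sublist y → pvIsSubseq x y = true := by
  intro y
  induction y with
  | nil =>
    intro x h
    rw [List.sublist_nil.mp h]
    exact pv_isSubseq_nil _
  | cons b bs ih =>
    intro x h
    cases x with
    | nil => exact pv_isSubseq_nil _
    | cons c cs =>
      by_cases hcb : c = b
      · subst hcb
        have hcs : cs.Sublist bs := List.cons_sublist_cons.mp h
        simp [pvIsSubseq, pvSkipUntil, ih cs hcs]
      · have h' : (c :: cs).Sublist bs := by
          cases h with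
          | cons _ h => exact h
          | cons₂ => exact absurd rfl hcb
        have hih := ih _ h'
        simp only [pvIsSubseq, pvSkipUntil] at hih ⊢
        rwa [if_neg (show ¬ b = c from fun h => hcb h.symm)]

-- A's precedence scan, when at least one symbol occurs, is the idxOf comparison.
lemma pv_higherPrec_eq {a b : String} (hne : a ≠ b) :
    ∀ pl : List String, (a ∈ pl ∨ b ∈ pl) →
      pvHigherPrec a b pl = some (decide (pl.idxOf a < pl.idxOf b)) := by
  intro pl
  induction pl with
  | nil => simp
  | cons x rest ih =>
    intro hmem
    rw [show pvHigherPrec a b (x :: rest)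
        = (if a = x then some true else if b = x then some false else pvHigherPrec a b rest)
      from rfl]
    by_cases hax : a = x
    · have hxb : x ≠ b := fun h => hne (hax.trans h)
      rw [if_pos hax, List.idxOf_cons_eq rest hax.symm, List.idxOf_cons_ne rest hxb]
      simp
    · by_cases hbx : b = x
      · have hxa : x ≠ a := fun h => hax h.symm
        rw [if_neg hax, if_pos hbx, List.idxOf_cons_eq rest hbx.symm, List.idxOf_cons_ne rest hxa]
        simp
      · have hmem' : a ∈ rest ∨ b ∈ rest := by
          rcases hmem with h | h
          · rcases List.mem_cons.mp h with h' | h'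
            · exact absurd h' hax
            · exact Or.inl h'
          · rcases List.mem_cons.mp h with h' | h'
            · exact absurd h' hbx
            · exact Or.inr h'
        rw [if_neg hax, if_neg hbx, ih hmem',
          List.idxOf_cons_ne rest (fun h => hax h.symm),
          List.idxOf_cons_ne rest (fun h => hbx h.symm)]
        simp

-- B's rank dictionary holds the first index of each key.
lemma pvBuildRank_get? : ∀ (pl : List String) (i : Nat) (d : PySem.Dict String Nat) (s : String),
    (pvBuildRank pl i d).get? s =
      match d.get? s with
      | some v => some v
      | none => if s ∈ pl then some (pl.idxOf s + i) else none := by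
  intro pl
  induction pl with
  | nil =>
    intro i d s
    simp only [pvBuildRank]
    cases d.get? s <;> simp
  | cons x rest ih =>
    intro i d s
    rw [pvBuildRank, ih]
    by_cases hx : d.contains x
    · rw [if_pos hx]
      cases hds : d.get? s with
      | some v => simp
      | none =>
        have hsx : s ≠ x := by
          intro h
          rw [PySem.Dict.contains_eq_isSome_get?] at hx
          rw [← h, hds] at hx
          simp at hx
        by_cases hmem : s ∈ rest
        all_goals simp [hmem, hsx, List.idxOf_cons_ne rest (fun h => hsx h.symm)]
        all_goals omega
    · rw [if_neg hx, PySem.Dict.get?_insert]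
      by_cases hsx : s = x
      · subst hsx
        have hnone : d.get? s = none := by
          rw [PySem.Dict.contains_eq_isSome_get?] at hx
          cases h : d.get? s with
          | none => rfl
          | some v => rw [h] at hx; simp at hx
        simp [hnone, List.idxOf_cons_eq rest rfl]
      · rw [if_neg hsx]
        cases hds : d.get? s with
        | some v => simp
        | none =>
          by_cases hmem : s ∈ rest
          all_goals simp [hmem, hsx, List.idxOf_cons_ne rest (fun h => hsx h.symm)]
          all_goals omega

lemma pv_rank_getD (pl : List String) (s : String) :
    (pvBuildRank pl 0 PySem.Dict.empty).getD s pl.length = pl.idxOf s := by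
  rw [PySem.Dict.getD_eq_get?_getD, pvBuildRank_get?]
  simp only [PySem.Dict.get?_empty]
  by_cases h : s ∈ pl
  · simp [h]
  · simp [h]

-- main induction for the covered-pairs part of Pre_
lemma pv_main (pl : List String) : ∀ (N : Nat) (s1 s2 : List Char),
    s1.length + s2.length ≤ N →
    (∀ c1 ∈ s1, ∀ c2 ∈ s2, c1 ≠ c2 →
        (String.singleton c1 ∈ pl ∨ String.singleton c2 ∈ pl)) →
    pvRpoeqAux s1 s2 pl
      = some (pvAltLoop (pvBuildRank pl 0 PySem.Dict.empty) pl.length s1 s2) := by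
  intro N
  induction N with
  | zero =>
    intro s1 s2 hlen _
    have h1 : s1 = [] := by cases s1 with | nil => rfl | cons a as => simp at hlen
    have h2 : s2 = [] := by cases s2 with | nil => rfl | cons a as => simp at hlen
    subst h1; subst h2
    rw [pvRpoeqAux.eq_def, pvAltLoop.eq_def, pv_trim_eq]
    simp [pvTrimB]
  | succ N ih =>
    intro s1 s2 hlen hpre
    rw [pvRpoeqAux.eq_def, pvAltLoop.eq_def, pv_trim_eq]
    by_cases he : (pvTrimB s1 s2).1 = (pvTrimB s1 s2).2
    · simp [he]
    · rw [pv_subseqB_eq, pv_subseqB_eq]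
      by_cases hs1 : pvIsSubseq (pvTrimB s1 s2).1 (pvTrimB s1 s2).2
      · simp [he, hs1]
      · by_cases hs2 : pvIsSubseq (pvTrimB s1 s2).2 (pvTrimB s1 s2).1
        · simp [he, hs1, hs2]
        · have hne1 : (pvTrimB s1 s2).1 ≠ [] := by
            intro h; rw [h, pv_isSubseq_nil] at hs1; exact hs1 rfl
          have hne2 : (pvTrimB s1 s2).2 ≠ [] := by
            intro h; rw [h, pv_isSubseq_nil] at hs2; exact hs2 rfl
          have hl1 := pvTrimB_fst_length s1 s2
          have hl2 := pvTrimB_snd_length s1 s2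
          have hsub1 : (pvTrimB s1 s2).1 ⊆ s1 := by
            simp only [pvTrimB]; exact List.take_subset _ _
          have hsub2 : (pvTrimB s1 s2).2 ⊆ s2 := by
            simp only [pvTrimB]; exact List.take_subset _ _
          have hpre' : ∀ x, x ⊆ s1 → ∀ y, y ⊆ s2 →
              (∀ c1 ∈ x, ∀ c2 ∈ y, c1 ≠ c2 →
                (String.singleton c1 ∈ pl ∨ String.singleton c2 ∈ pl)) :=
            fun x hx y hy c1 hc1' c2 hc2' => hpre c1 (hx hc1') c2 (hy hc2')
          obtain ⟨xa, r1, hc1⟩ := List.exists_cons_of_ne_nil hne1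
          obtain ⟨xb, r2, hc2⟩ := List.exists_cons_of_ne_nil hne2
          simp only [he, hs1, hs2, dif_neg, not_false_iff, Bool.false_eq_true]
          rw [hc1, hc2]
          simp only [List.headI, List.tail]
          have htl1 : r1 ⊆ s1 := fun c hc => hsub1 (hc1 ▸ List.mem_cons_of_mem _ hc)
          have htl2 : r2 ⊆ s2 := fun c hc => hsub2 (hc2 ▸ List.mem_cons_of_mem _ hc)
          have hx1 : xa ∈ s1 := hsub1 (hc1 ▸ List.mem_cons_self)
          have hx2 : xb ∈ s2 := hsub2 (hc2 ▸ List.mem_cons_self)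
          have hlc1 : r1.length + 1 ≤ s1.length := by
            have := hc1 ▸ hl1; simpa using this
          have hlc2 : r2.length + 1 ≤ s2.length := by
            have := hc2 ▸ hl2; simpa using this
          by_cases hx : xa = xb
          · simp only [if_pos hx]
            exact ih r1 r2 (by omega) (hpre' r1 htl1 r2 htl2)
          · simp only [if_neg hx]
            rw [pv_higherPrec_eq (pv_singleton_ne hx) pl (hpre xa hx1 xb hx2 hx),
              pv_rank_getD, pv_rank_getD]
            by_cases hlt : pl.idxOf (String.singleton xa) < pl.idxOf (String.singleton xb)
            · simp only [if_pos hlt, decide_eq_true hlt]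
              exact ih (xa :: r1) r2 (by simp only [List.length_cons]; omega)
                (hpre' (xa :: r1) (hc1 ▸ hsub1) r2 htl2)
            · simp only [if_neg hlt, decide_eq_false hlt]
              exact ih r1 (xb :: r2) (by simp only [List.length_cons]; omega)
                (hpre' r1 htl1 (xb :: r2) (hc2 ▸ hsub2))

-- the subsequence part of Pre_: both programs answer in the first iteration.
lemma pv_main_sub (s1 s2 : List Char) (pl : List String)
    (h : s1.Sublist s2 ∨ s2.Sublist s1) :
    pvRpoeqAux s1 s2 pl
      = some (pvAltLoop (pvBuildRank pl 0 PySem.Dict.empty) pl.length s1 s2) := by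
  rw [pvRpoeqAux.eq_def, pvAltLoop.eq_def, pv_trim_eq]
  by_cases he : (pvTrimB s1 s2).1 = (pvTrimB s1 s2).2
  · simp [he]
  · rw [pv_subseqB_eq, pv_subseqB_eq]
    by_cases hs1 : pvIsSubseq (pvTrimB s1 s2).1 (pvTrimB s1 s2).2
    · simp [he, hs1]
    · have ht : ((pvTrimB s1 s2).2).Sublist (pvTrimB s1 s2).1 := by
        rcases h with h | h
        · exact absurd (pv_sublist_isSubseq _ _ (pv_trim_sublist h)) (by simpa using hs1)
        · exact pv_trim_sublist' h
      have hs2 : pvIsSubseq (pvTrimB s1 s2).2 (pvTrimB s1 s2).1 = true :=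
        pv_sublist_isSubseq _ _ ht
      simp [he, hs1, hs2]

-- ===== VERDICT (by name: the statement is the Claim_ definition above) =====
theorem rpoeq_spec : Claim_equal_rpoeq := by
  intro str1 str2 preclist _hd hpre
  unfold Spec_rpoeq rpoeq rpoeq_alt
  rcases hpre with h | h | h
  · have h' : ∀ c1 ∈ str1.toList, ∀ c2 ∈ str2.toList, c1 ≠ c2 →
        (String.singleton c1 ∈ preclist ∨ String.singleton c2 ∈ preclist) := by
      simp only [List.all_eq_true, Bool.or_eq_true, beq_iff_eq, List.contains_eq_mem,
        decide_eq_true_eq] at h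
      intro c1 h1 c2 h2 hne
      rcases h c1 h1 c2 h2 with (h'' | h'') | h''
      · exact absurd h'' hne
      · exact Or.inl h''
      · exact Or.inr h''
    rw [pv_main preclist (str1.toList.length + str2.toList.length) _ _ le_rfl h']
    rfl
  · rw [pv_main_sub str1.toList str2.toList preclist (Or.inl h)]
    rfl
  · rw [pv_main_sub str1.toList str2.toList preclist (Or.inr h)]
    rfl
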